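-- pv_equiv track=rewrite | github.com/saehyen/Python_algorithm | RacommandJob/RacommandJob.py | solution
-- ===== SOURCE A (Python) =====
-- def solution(table, languages, preference):
--     newtable =[]
--     score = [0] * len(table)
--     for ta in table :
--         newtable.append(ta.split())
--
--     #1 사용 언어 별 직업군 점수 구하기
--     for lang, pre in zip(languages,preference) :
--         for i in range(len(table)) :
--             if lang in table[i] :
--                 score[i] += (6 - newtable[i].index(lang))*pre
--
--     pos = [newtable[i][0] for i in range(len(newtable))] # pos = 직업군 목록(이름)이 담긴 리스트
--
--     #2 pos 정렬, 정렬 기준 1순위 - 총점 내림차순, 2순위 - 직업군 이름 오름차순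
--     sortedPos = sorted(dict(zip(pos, score)).items(), key = lambda x: (-x[1], x[0]))
--
--     # answer = 가장 높은 총점 & 이름이 사전 순으로 앞에 오는 직업군
--     answer = sortedPos[0][0]
--
--     return answer
-- ===== SOURCE B (Python) =====
-- def solution(table, languages, preference):
--     # Row-major single scoring pass into a dict (duplicate job names: last row wins,
--     # like dict(zip(...)) in the original), then a linear best scan instead of a sort.
--     scores = {}
--     for row in table:
--         toks = row.split()
--         scores[toks[0]] = sum((6 - toks.index(l)) * p for l, p in zip(languages, preference) if l in toks)
--     best = None
--     for name, sc in scores.items():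
--         if best is None or sc > best[1] or (sc == best[1] and name < best[0]):
--             best = (name, sc)
--     return best[0]
-- ===== Notes on version B (the rewrite author's own statement) =====
-- stated objective: simpler
-- what changed: A builds a score array with a language-major nested loop over substring tests, then rebuilds a name->score dict and fully sorts its items by (-score, name); B scores row-major in one pass straight into the dict via token membership and replaces the sort with a linear best scan over the dict items.
import Mathlib
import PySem

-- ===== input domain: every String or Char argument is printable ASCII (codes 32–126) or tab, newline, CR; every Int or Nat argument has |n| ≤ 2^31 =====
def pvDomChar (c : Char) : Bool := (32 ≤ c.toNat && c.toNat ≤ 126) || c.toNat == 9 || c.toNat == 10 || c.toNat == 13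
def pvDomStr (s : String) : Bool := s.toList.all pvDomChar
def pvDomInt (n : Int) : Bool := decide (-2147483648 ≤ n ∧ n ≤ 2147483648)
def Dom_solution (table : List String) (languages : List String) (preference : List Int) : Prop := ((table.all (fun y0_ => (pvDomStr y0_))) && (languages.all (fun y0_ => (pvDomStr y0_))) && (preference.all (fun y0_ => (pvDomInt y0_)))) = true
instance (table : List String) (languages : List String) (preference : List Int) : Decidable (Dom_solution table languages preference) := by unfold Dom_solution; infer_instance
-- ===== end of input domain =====

-- B replaces A's language-major score array and full sort of the dict items by a row-major
-- scoring pass into the dict and a linear best scan; objective: simpler.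

-- ===== PORT A =====
-- the body of A's inner 'for i in range(len(table))' loop, for one (lang, pre) pair
def pvA_inner (newtable : List (List String)) (table : List String) (lp : String × Int)
    (sc : List Int) : List Int :=
  (PySem.List.pyRange 0 (PySem.List.len table)).foldl (fun sc i =>
    if PySem.Str.isIn lp.1 (PySem.List.pyGetD table i "") then
      PySem.List.pySetD sc i (PySem.List.pyGetD sc i 0 +
        (6 - (((PySem.List.index? (PySem.List.pyGetD newtable i []) lp.1).getD 0 : Nat) : Int)) * lp.2)
    else sc) sc

def solution (table : List String) (languages : List String) (preference : List Int) : String :=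
  let newtable := table.foldl (fun acc ta => acc ++ [PySem.Str.split₀ ta]) []
  let score := (languages.zip preference).foldl (fun sc lp => pvA_inner newtable table lp sc)
      (List.replicate table.length 0)
  let pos := (PySem.List.pyRange 0 (PySem.List.len newtable)).map
      (fun i => PySem.List.pyGetD (PySem.List.pyGetD newtable i []) 0 "")
  (PySem.List.pyGetD
    (PySem.List.sorted2 (PySem.Dict.ofList (pos.zip score)).items (fun x => -x.2) (fun x => x.1))
    0 ("", 0)).1

-- ===== PORT B =====
-- B's per-row score: sum((6 - toks.index(l)) * p for l, p in zip(languages, preference) if l in toks)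
def pvB_score (languages : List String) (preference : List Int) (toks : List String) : Int :=
  (((languages.zip preference).filter (fun lp => toks.contains lp.1)).map
    (fun lp => (6 - (((PySem.List.index? toks lp.1).getD 0 : Nat) : Int)) * lp.2)).sum

-- B's second loop body: keep the running best (score descending, then name ascending)
def pvB_step (best : Option (String × Int)) (p : String × Int) : Option (String × Int) :=
  match best with
  | none => some p
  | some b => if b.2 < p.2 || (p.2 == b.2 && p.1 < b.1) then some p else some b

def solution_alt (table : List String) (languages : List String) (preference : List Int) : String :=
  let scores := table.foldl (fun d row =>
      d.insert (PySem.List.pyGetD (PySem.Str.split₀ row) 0 "")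
        (pvB_score languages preference (PySem.Str.split₀ row))) (PySem.Dict.empty : PySem.Dict String Int)
  match scores.items.foldl pvB_step none with
  | some b => b.1
  | none => ""  -- unreachable under Pre_ (on an empty table Source B raises, as A does)

-- ===== PRECONDITION & SPEC =====
-- Pre_ excludes exactly the inputs on which A raises: an empty table (IndexError), a row with no
-- tokens (IndexError), or a used language occurring as a substring of a row but not as one of its
-- tokens (ValueError from .index).  The third conjunct is stated as an equality, but a token is
-- always a substring of its row, so it only excludes the ValueError inputs.
def Pre_solution (table : List String) (languages : List String) (preference : List Int) : Prop :=
  table ≠ [] ∧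
  (∀ t ∈ table, PySem.Str.split₀ t ≠ []) ∧
  (∀ lp ∈ languages.zip preference, ∀ t ∈ table,
     PySem.Str.isIn lp.1 t = (PySem.Str.split₀ t).contains lp.1)
instance (table : List String) (languages : List String) (preference : List Int) : Decidable (Pre_solution table languages preference) := by unfold Pre_solution; infer_instance

def pvWitness_solution : List String × List String × List Int :=
  (["SI python java", "CONTENTS c"], ["python", "c"], [3, 2])


def Spec_solution (table : List String) (languages : List String) (preference : List Int) (out : String) : Prop := out = solution_alt table languages preference
instance (table : List String) (languages : List String) (preference : List Int) (out : String) : Decidable (Spec_solution table languages preference out) := by unfold Spec_solution; infer_instance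

-- ===== CLAIM (what is proved, stated in full; the proofs are below) =====
def Claim_equal_solution : Prop := ∀ (table : List String) (languages : List String) (preference : List Int), Dom_solution table languages preference → Pre_solution table languages preference → Spec_solution table languages preference (solution table languages preference)

-- ===== LEMMAS AND PROOFS =====

-- A's contribution of one (lang, pre) pair to the score of row t
def pvContrib (lp : String × Int) (t : String) : Int :=
  if PySem.Str.isIn lp.1 t then
    (6 - (((PySem.List.index? (PySem.Str.split₀ t) lp.1).getD 0 : Nat) : Int)) * lp.2
  else 0

-- the total score A assigns to row t
def pvScoreA (zl : List (String × Int)) (t : String) : Int :=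
  ((zl.filter (fun lp => PySem.Str.isIn lp.1 t)).map
    (fun lp => (6 - (((PySem.List.index? (PySem.Str.split₀ t) lp.1).getD 0 : Nat) : Int)) * lp.2)).sum

-- the comparison underlying sorted2's insertion sort for the key (-score, name)
def pvBefore (x m : String × Int) : Bool :=
  decide ((-x.2 : Int) < -m.2) || (!decide ((-m.2 : Int) < -x.2) && decide (x.1 < m.1))

theorem pv_setD_natCast (xs : List Int) (j : Nat) (v : Int) (h : j < xs.length) :
    PySem.List.pySetD xs (j : Int) v = xs.set j v := by
  have hj : ((j : Int) < (xs.length : Int)) := by exact_mod_cast h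
  simp [PySem.List.pySetD, PySem.List.pySet?, PySem.List.pyIdx?, hj]

-- one pass of A's inner loop over range' a n updates each in-window index once
theorem pv_inner_aux (cond : Nat → Bool) (f : Nat → Int) :
    ∀ (n a : Nat) (sc : List Int), a + n ≤ sc.length →
    ((List.range' a n).foldl (fun s j =>
        if cond j then PySem.List.pySetD s (j : Int) (PySem.List.pyGetD s (j : Int) 0 + f j) else s) sc).length = sc.length ∧
    ∀ j : Nat, ((List.range' a n).foldl (fun s j =>
        if cond j then PySem.List.pySetD s (j : Int) (PySem.List.pyGetD s (j : Int) 0 + f j) else s) sc).getD j 0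
      = sc.getD j 0 + (if a ≤ j ∧ j < a + n ∧ cond j then f j else 0) := by
  intro n
  induction n with
  | zero => intro a sc _; exact ⟨rfl, fun j => by simp; omega⟩
  | succ n ih =>
    intro a sc hlen
    rw [List.range'_succ, List.foldl_cons]
    set sc' := (if cond a then PySem.List.pySetD sc (a : Int) (PySem.List.pyGetD sc (a : Int) 0 + f a) else sc) with hsc'
    have ha : a < sc.length := by omega
    have hsc'eq : sc' = if cond a then sc.set a (sc.getD a 0 + f a) else sc := by
      rw [hsc', pv_setD_natCast sc a _ ha, PySem.List.pyGetD_natCast]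
    have hlen' : sc'.length = sc.length := by
      rw [hsc'eq]; split <;> simp
    have hget : ∀ j : Nat, sc'.getD j 0 = sc.getD j 0 + (if a = j ∧ cond a then f a else 0) := by
      intro j
      rw [hsc'eq]
      by_cases hc : cond a
      · simp only [hc, if_true]
        by_cases hj : a = j
        · subst hj
          simp only [List.getD_eq_getElem?_getD, List.getElem?_set_self, ha, if_true, true_and]
          rw [List.getElem?_eq_getElem ha]
          simp
        · simp [List.getD_eq_getElem?_getD, List.getElem?_set_ne hj, hj]
      · simp [hc]
    obtain ⟨ihlen, ihget⟩ := ih (a + 1) sc' (by omega)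
    refine ⟨by rw [ihlen, hlen'], fun j => ?_⟩
    rw [ihget j, hget j]
    by_cases hc : cond j <;> by_cases h1 : a = j <;> by_cases h2 : a + 1 ≤ j ∧ j < a + 1 + n <;>
      subst_eqs <;> simp_all <;> omega

theorem pv_inner_eq (table : List String) (newtable : List (List String)) (lp : String × Int)
    (hnt : newtable = table.map PySem.Str.split₀) (g : String → Int) :
    pvA_inner newtable table lp (table.map g) = table.map (fun t => g t + pvContrib lp t) := by
  unfold pvA_inner
  have hlen : PySem.List.len table = ((table.length : Nat) : Int) := rfl
  rw [hlen, PySem.List.pyRange_zero_natCast, List.foldl_map, List.range_eq_range']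
  obtain ⟨h1, h2⟩ := pv_inner_aux
    (fun j => PySem.Str.isIn lp.1 (PySem.List.pyGetD table (j : Int) ""))
    (fun j => (6 - (((PySem.List.index? (PySem.List.pyGetD newtable (j : Int) []) lp.1).getD 0 : Nat) : Int)) * lp.2)
    table.length 0 (table.map g) (by simp)
  apply List.ext_getElem
  · rw [h1]; simp
  · intro j hj hj'
    have hjt : j < table.length := by simpa using hj'
    have hg1 : ∀ (l : List Int) (h : j < l.length), l[j] = l.getD j 0 := by
      intro l h; rw [List.getD_eq_getElem?_getD, List.getElem?_eq_getElem h]; rfl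
    rw [hg1 _ hj, hg1 _ hj', h2 j]
    have ht : PySem.List.pyGetD table (j : Int) "" = table[j] := by
      rw [PySem.List.pyGetD_natCast, List.getD_eq_getElem?_getD, List.getElem?_eq_getElem hjt]; rfl
    have hn : PySem.List.pyGetD newtable (j : Int) [] = PySem.Str.split₀ table[j] := by
      rw [hnt, PySem.List.pyGetD_natCast, List.getD_eq_getElem?_getD,
        List.getElem?_eq_getElem (by simpa using hjt)]
      simp
    have hmg : (table.map g).getD j 0 = g table[j] := by
      rw [List.getD_eq_getElem?_getD, List.getElem?_eq_getElem (by simpa using hjt)]; simp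
    rw [hmg, ht, hn]
    have hrhs : (List.map (fun t => g t + pvContrib lp t) table).getD j 0
        = g table[j] + pvContrib lp table[j] := by
      rw [List.getD_eq_getElem?_getD, List.getElem?_eq_getElem (by simpa using hjt)]; simp
    rw [hrhs]
    unfold pvContrib
    by_cases hc : PySem.Str.isIn lp.1 table[j] = true
    · rw [if_pos hc, if_pos (by exact ⟨Nat.zero_le j, by omega, hc⟩)]
    · rw [if_neg hc, if_neg (fun h => hc h.2.2)]

theorem pv_scoreA_cons (lp : String × Int) (zl : List (String × Int)) (t : String) :
    pvScoreA (lp :: zl) t = pvContrib lp t + pvScoreA zl t := by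
  unfold pvScoreA pvContrib
  rw [List.filter_cons]
  by_cases hc : PySem.Str.isIn lp.1 t = true
  · rw [if_pos hc, if_pos hc, List.map_cons, List.sum_cons]
  · rw [if_neg hc, if_neg hc, zero_add]

theorem pv_outer_eq (table : List String) (newtable : List (List String))
    (hnt : newtable = table.map PySem.Str.split₀) :
    ∀ (zl : List (String × Int)) (g : String → Int),
    zl.foldl (fun sc lp => pvA_inner newtable table lp sc) (table.map g)
      = table.map (fun t => g t + pvScoreA zl t) := by
  intro zl
  induction zl with
  | nil => intro g; simp [pvScoreA]
  | cons lp zl ih =>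
    intro g
    rw [List.foldl_cons, pv_inner_eq table newtable lp hnt g, ih]
    apply List.map_congr_left
    intro t _
    rw [pv_scoreA_cons]
    ring

theorem pv_scoreA_eq_scoreB (languages : List String) (preference : List Int) (t : String)
    (h : ∀ lp ∈ languages.zip preference,
        PySem.Str.isIn lp.1 t = (PySem.Str.split₀ t).contains lp.1) :
    pvScoreA (languages.zip preference) t = pvB_score languages preference (PySem.Str.split₀ t) := by
  unfold pvScoreA pvB_score
  rw [List.filter_congr h]

theorem pv_insertBy_cons (before : String × Int → String × Int → Bool) (x h : String × Int)
    (t : List (String × Int)) :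
    PySem.List.insertBy before x (h :: t)
      = if before x h then x :: h :: t else h :: PySem.List.insertBy before x t := by
  by_cases hb : before x h
  · rw [if_pos hb]
    conv_lhs => unfold PySem.List.insertBy
    simp [hb]
  · rw [if_neg hb]
    conv_lhs => unfold PySem.List.insertBy
    simp [hb]

-- the head of an insertion sort is the running minimum of the processed elements
theorem pv_foldl_insertBy_head (before : String × Int → String × Int → Bool) (d : String × Int) :
    ∀ (l acc : List (String × Int)) (h : String × Int) (tl : List (String × Int)),
      acc = h :: tl →
      (l.foldl (fun acc x => PySem.List.insertBy before x acc) acc).getD 0 d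
        = l.foldl (fun m x => if before x m then x else m) h := by
  intro l
  induction l with
  | nil => intro acc h tl hacc; simp [hacc]
  | cons x l ih =>
    intro acc h tl hacc
    subst hacc
    rw [List.foldl_cons, List.foldl_cons, pv_insertBy_cons]
    by_cases hb : before x h
    · rw [if_pos hb, if_pos hb]; exact ih _ x (h :: tl) rfl
    · rw [if_neg hb, if_neg hb]; exact ih _ h (PySem.List.insertBy before x tl) rfl

-- sorted2's comparison for key (-score, name) is B's "score desc, then name asc" test
theorem pv_before_eq (x m : String × Int) :
    pvBefore x m = (decide (m.2 < x.2) || (x.2 == m.2 && decide (x.1 < m.1))) := by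
  unfold pvBefore
  rcases lt_trichotomy x.2 m.2 with h | h | h <;> simp [h, beq_iff_eq] <;> omega

-- once B's accumulator is some, the fold is a plain running-minimum scan
theorem pv_opt_fold :
    ∀ (l : List (String × Int)) (m : String × Int),
      l.foldl pvB_step (some m)
        = some (l.foldl (fun m x => if pvBefore x m then x else m) m) := by
  intro l
  induction l with
  | nil => intro m; rfl
  | cons x l ih =>
    intro m
    rw [List.foldl_cons, List.foldl_cons]
    have hstep : pvB_step (some m) x = some (if pvBefore x m then x else m) := by
      rw [pv_before_eq]
      simp only [pvB_step]
      exact (apply_ite some _ _ _).symm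
    rw [hstep, ih]

-- the head of A's sort of a pair list is exactly B's linear best scan over it
theorem pv_sort_head_eq_scan (L : List (String × Int)) :
    (PySem.List.pyGetD (PySem.List.sorted2 L (fun x => -x.2) (fun x => x.1)) 0 ("", 0)).1
      = (match L.foldl pvB_step none with
         | some b => b.1
         | none => "") := by
  cases L with
  | nil => rfl
  | cons p rest =>
    rw [PySem.List.pyGetD_zero]
    have hsorted : PySem.List.sorted2 (p :: rest) (fun x => -x.2) (fun x => x.1) false
        = (p :: rest).foldl (fun acc x => PySem.List.insertBy pvBefore x acc) [] := rfl
    rw [hsorted, List.foldl_cons]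
    have hfirst : PySem.List.insertBy pvBefore p ([] : List (String × Int)) = [p] := by
      unfold PySem.List.insertBy; rfl
    rw [hfirst, pv_foldl_insertBy_head pvBefore ("", 0) rest [p] p [] rfl]
    rw [List.foldl_cons]
    have hstep0 : pvB_step none p = some p := rfl
    rw [hstep0, pv_opt_fold rest p]

theorem pv_main (table : List String) (languages : List String) (preference : List Int)
    (hiff : ∀ lp ∈ languages.zip preference, ∀ t ∈ table,
       PySem.Str.isIn lp.1 t = (PySem.Str.split₀ t).contains lp.1) :
    solution table languages preference = solution_alt table languages preference := by
  unfold solution solution_alt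
  simp only []
  set rowfn : String → String × Int := fun t =>
    (PySem.List.pyGetD (PySem.Str.split₀ t) 0 "",
     pvB_score languages preference (PySem.Str.split₀ t)) with hrowfn
  have hnt : table.foldl (fun acc ta => acc ++ [PySem.Str.split₀ ta]) ([] : List (List String))
      = table.map PySem.Str.split₀ := by
    rw [PySem.List.foldl_append_singleton_eq_map, List.nil_append]
  rw [hnt]
  have hrep : List.replicate table.length (0 : Int) = table.map (fun _ => 0) := by simp
  rw [hrep, pv_outer_eq table _ rfl (languages.zip preference) (fun _ => 0)]
  have hsc : table.map (fun t => (fun _ => (0 : Int)) t + pvScoreA (languages.zip preference) t)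
      = table.map (fun t => pvB_score languages preference (PySem.Str.split₀ t)) := by
    apply List.map_congr_left
    intro t ht
    rw [zero_add, pv_scoreA_eq_scoreB languages preference t (fun lp hlp => hiff lp hlp t ht)]
  rw [hsc]
  have hpos : (PySem.List.pyRange 0 (PySem.List.len (table.map PySem.Str.split₀))).map
      (fun i => PySem.List.pyGetD (PySem.List.pyGetD (table.map PySem.Str.split₀) i []) 0 "")
      = table.map (fun t => PySem.List.pyGetD (PySem.Str.split₀ t) 0 "") := by
    have hcomp : (fun i => PySem.List.pyGetD (PySem.List.pyGetD (table.map PySem.Str.split₀) i []) 0 "")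
        = ((fun r => PySem.List.pyGetD r 0 "") ∘ (fun i : Int => PySem.List.pyGetD (table.map PySem.Str.split₀) i [])) := rfl
    rw [hcomp, ← List.map_map, PySem.List.map_pyGetD_pyRange_zero, List.map_map]
    rfl
  rw [hpos]
  have hzip : (table.map (fun t => PySem.List.pyGetD (PySem.Str.split₀ t) 0 "")).zip
      (table.map (fun t => pvB_score languages preference (PySem.Str.split₀ t)))
      = table.map rowfn := by
    rw [hrowfn, List.zip_map']
  rw [hzip]
  have hdict : PySem.Dict.ofList (table.map rowfn)
      = table.foldl (fun d row =>
          d.insert (PySem.List.pyGetD (PySem.Str.split₀ row) 0 "")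
            (pvB_score languages preference (PySem.Str.split₀ row)))
          (PySem.Dict.empty : PySem.Dict String Int) := by
    simp only [PySem.Dict.ofList, PySem.Dict.update, List.foldl_map, hrowfn]
  rw [hdict, pv_sort_head_eq_scan]

-- ===== VERDICT (by name: the statement is the Claim_ definition above) =====
theorem solution_spec : Claim_equal_solution := by
  intro table languages preference _ hpre
  unfold Spec_solution
  exact pv_main table languages preference hpre.2.2
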